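-- pv_equiv track=rewrite | github.com/jsamwel/advent_of_cade | day8/part1.py | find_visible
-- ===== SOURCE A (Python) =====
-- def find_visible(row: list):
--     highest = int(row[0])
--     locations = [0]
--
--     for index, tree in enumerate(row):
--         if int(tree) > highest:
--             locations.append(index)
--             highest = int(tree)
--
--     return locations
-- ===== SOURCE B (Python) =====
-- def find_visible(row: list):
--     m = int(row[0])
--     prefix_max = []
--     for tree in row:
--         m = max(m, int(tree))
--         prefix_max.append(m)
--     return [0] + [i for i, (tree, p) in enumerate(zip(row[1:], prefix_max), 1)
--                   if int(tree) > p]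
-- ===== Notes on version B (the rewrite author's own statement) =====
-- stated objective: alternative
-- what changed: A's single loop carrying a running max and appending indices is replaced by two passes: first build a prefix-maximum list, then emit the visible indices via an index-free comprehension over enumerate of the row's tail zipped with the prefix maxima.
import Mathlib
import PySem

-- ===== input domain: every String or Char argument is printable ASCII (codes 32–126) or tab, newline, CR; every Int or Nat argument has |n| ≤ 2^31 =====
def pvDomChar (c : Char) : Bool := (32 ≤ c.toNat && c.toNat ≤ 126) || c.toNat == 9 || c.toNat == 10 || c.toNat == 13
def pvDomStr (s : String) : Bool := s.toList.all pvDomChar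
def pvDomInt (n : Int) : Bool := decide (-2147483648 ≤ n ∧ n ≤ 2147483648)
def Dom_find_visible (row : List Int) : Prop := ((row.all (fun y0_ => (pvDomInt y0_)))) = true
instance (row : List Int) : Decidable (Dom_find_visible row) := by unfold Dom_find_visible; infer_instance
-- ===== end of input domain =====

-- B replaces A's single running-max-and-append loop by a separate prefix-maximum pass
-- followed by an index-free zip/enumerate comprehension (objective: alternative decomposition, same cost).

-- ===== PORT A =====
-- literal port of Source A: row[0] (IndexError on [] → Pre_), then one foldl over enumerate(row)
-- carrying (highest, locations).
def find_visible (row : List Int) : List Int :=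
  match PySem.List.pyGet? row 0 with
  | none => []   -- unreachable under Pre_find_visible (Python raises IndexError)
  | some h0 =>
    ((PySem.List.enumerate row 0).foldl
      (fun (s : Int × List Int) p => if p.2 > s.1 then (p.2, s.2 ++ [p.1]) else s)
      (h0, [0])).2

-- ===== PORT B =====
-- literal port of Source B: prefix-maximum list built in one pass, then a comprehension over
-- enumerate(zip(row[1:], prefix_max), 1).
def find_visible_alt (row : List Int) : List Int :=
  match PySem.List.pyGet? row 0 with
  | none => []   -- unreachable under Pre_find_visible (Python raises IndexError)
  | some m0 =>
    let pm := (row.foldl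
      (fun (acc : Int × List Int) t => (max acc.1 t, acc.2 ++ [max acc.1 t]))
      (m0, ([] : List Int))).2
    0 :: (PySem.List.enumerate ((PySem.List.slice row (some 1) none).zip pm) 1).filterMap
      (fun p => if p.2.1 > p.2.2 then some p.1 else none)

-- ===== PRECONDITION & SPEC =====
-- Pre_ excludes only the empty list, on which A raises IndexError at row[0].
def Pre_find_visible (row : List Int) : Prop := row ≠ []
instance (row : List Int) : Decidable (Pre_find_visible row) := by unfold Pre_find_visible; infer_instance
def pvWitness_find_visible : List Int := [3, 1, 4, 4, 5]

def Spec_find_visible (row : List Int) (out : List Int) : Prop := out = find_visible_alt row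
instance (row : List Int) (out : List Int) : Decidable (Spec_find_visible row out) := by unfold Spec_find_visible; infer_instance

-- ===== CLAIM (what is proved, stated in full; the proofs are below) =====
def Claim_equal_find_visible : Prop := ∀ (row : List Int), Dom_find_visible row → Pre_find_visible row → Spec_find_visible row (find_visible row)

-- ===== LEMMAS AND PROOFS =====

-- reference result: indices (from k) of elements strictly greater than the running max m
def pvSpecList (m : Int) (k : Int) : List Int → List Int
  | [] => []
  | x :: xs => if x > m then k :: pvSpecList x (k + 1) xs else pvSpecList m (k + 1) xs

def pvSpecMax (m : Int) : List Int → Int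
  | [] => m
  | x :: xs => if x > m then pvSpecMax x xs else pvSpecMax m xs

-- running prefix maxima of l seeded with m
def pvPmList (m : Int) : List Int → List Int
  | [] => []
  | x :: xs => max m x :: pvPmList (max m x) xs

theorem pvA_fold (t : List Int) : ∀ (k m : Int) (acc : List Int),
    (PySem.List.enumerate t k).foldl
      (fun (s : Int × List Int) p => if p.2 > s.1 then (p.2, s.2 ++ [p.1]) else s)
      (m, acc) = (pvSpecMax m t, acc ++ pvSpecList m k t) := by
  induction t with
  | nil => intro k m acc; simp [PySem.List.enumerate_nil, pvSpecMax, pvSpecList]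
  | cons x xs ih =>
    intro k m acc
    rw [PySem.List.enumerate_cons]
    by_cases h : x > m
    · simp [h, ih, pvSpecMax, pvSpecList]
    · simp [h, ih, pvSpecMax, pvSpecList]

theorem pvB_pm_fold (l : List Int) : ∀ (m : Int) (acc : List Int),
    l.foldl (fun (acc : Int × List Int) t => (max acc.1 t, acc.2 ++ [max acc.1 t]))
      (m, acc) = (pvSpecMax m l, acc ++ pvPmList m l) := by
  induction l with
  | nil => intro m acc; simp [pvSpecMax, pvPmList]
  | cons x xs ih =>
    intro m acc
    simp only [List.foldl_cons, ih (max m x) (acc ++ [max m x]), pvSpecMax, pvPmList]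
    by_cases h : x > m
    · have hmx : max m x = x := by omega
      simp [hmx, h]
    · have hmx : max m x = m := by omega
      simp [hmx, h]

theorem pvB_filter (t : List Int) : ∀ (m k : Int),
    (PySem.List.enumerate (t.zip (m :: pvPmList m t)) k).filterMap
      (fun p => if p.2.1 > p.2.2 then some p.1 else none) = pvSpecList m k t := by
  induction t with
  | nil => intro m k; simp [PySem.List.enumerate_nil, pvSpecList]
  | cons x xs ih =>
    intro m k
    simp only [List.zip_cons_cons, PySem.List.enumerate_cons, List.filterMap_cons, pvSpecList]
    by_cases h : x > m
    · have hmx : max m x = x := by omega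
      rw [pvPmList]
      simp only [hmx, ih x (k + 1)]
      simp [h]
    · have hmx : max m x = m := by omega
      rw [pvPmList]
      simp only [hmx, ih m (k + 1)]
      simp [h]

-- ===== VERDICT (by name: the statement is the Claim_ definition above) =====
theorem find_visible_spec : Claim_equal_find_visible := by
  intro row _ hpre
  obtain ⟨h, t, rfl⟩ := List.exists_cons_of_ne_nil hpre
  show find_visible (h :: t) = find_visible_alt (h :: t)
  have hget : PySem.List.pyGet? (h :: t) 0 = some h := by
    simp [PySem.List.pyGet?, PySem.List.pyIdx?]
  have hA : find_visible (h :: t) = [0] ++ pvSpecList h 1 t := by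
    unfold find_visible
    rw [hget]
    show (List.foldl (fun (s : Int × List Int) p => if p.2 > s.1 then (p.2, s.2 ++ [p.1]) else s)
      (h, [0]) (PySem.List.enumerate (h :: t) 0)).2 = [0] ++ pvSpecList h 1 t
    rw [PySem.List.enumerate_cons, List.foldl_cons]
    have h00 : (if ((0 : Int), h).2 > ((h : Int), ([0] : List Int)).1 then
          (((0 : Int), h).2, ((h : Int), ([0] : List Int)).2 ++ [((0 : Int), h).1])
        else ((h : Int), ([0] : List Int))) = (h, [0]) := by norm_num
    rw [h00, show (0 : Int) + 1 = 1 from rfl, pvA_fold t 1 h [0]]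
  have hpm : ((h :: t).foldl
      (fun (acc : Int × List Int) x => (max acc.1 x, acc.2 ++ [max acc.1 x]))
      (h, ([] : List Int))).2 = h :: pvPmList h t := by
    rw [List.foldl_cons, show max h h = h by omega, pvB_pm_fold t h ([] ++ [h])]
    simp
  have hB : find_visible_alt (h :: t) = 0 :: pvSpecList h 1 t := by
    unfold find_visible_alt
    rw [hget]
    show 0 :: (PySem.List.enumerate ((PySem.List.slice (h :: t) (some 1) none).zip
        (((h :: t).foldl (fun (acc : Int × List Int) x => (max acc.1 x, acc.2 ++ [max acc.1 x]))
          (h, ([] : List Int))).2)) 1).filterMap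
        (fun p => if p.2.1 > p.2.2 then some p.1 else none) = 0 :: pvSpecList h 1 t
    rw [hpm, PySem.List.slice_from_one, List.tail_cons, pvB_filter t h 1]
  rw [hA, hB]
  rfl
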